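-- pv_equiv track=rewrite | github.com/Leapense/problems | 23886번： 알프수/알프수.py | check_alpsu
-- ===== SOURCE A (Python) =====
-- def check_alpsu(differences):
--     # Check if there are any zeros in the differences list
--     if any(d == 0 for d in differences):
--         return False
--
--     # First element must be positive and last element must be negative for a mountain shape
--     if differences[0] < 0 or differences[-1] > 0:
--         return False
--
--     # Check for consecutive same signs and ensure no violations in the pattern
--     for i in range(len(differences) - 1):
--         if (differences[i] > 0 and differences[i + 1] > 0) or \
--            (differences[i] < 0 and differences[i + 1] < 0):
--             if differences[i] != differences[i + 1]:
--                 return False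
--
--     return True
-- ===== SOURCE B (Python) =====
-- def check_alpsu(differences):
--     # Check if there are any zeros in the differences list
--     if any(d == 0 for d in differences):
--         return False
--
--     # First element must be positive and last element must be negative for a mountain shape
--     if differences[0] < 0 or differences[-1] > 0:
--         return False
--
--     # Split into maximal same-sign runs; the pattern is valid iff every run is constant
--     runs = []
--     for d in differences:
--         if runs and (runs[-1][0] > 0) == (d > 0):
--             runs[-1].append(d)
--         else:
--             runs.append([d])
--     return all(all(x == run[0] for x in run) for run in runs)
-- ===== Notes on version B (the rewrite author's own statement) =====
-- stated objective: alternative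
-- what changed: Replaces the adjacent-index pair scan with a run-based pass: the differences are grouped into maximal same-sign runs and each run is checked for being constant.
import Mathlib
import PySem

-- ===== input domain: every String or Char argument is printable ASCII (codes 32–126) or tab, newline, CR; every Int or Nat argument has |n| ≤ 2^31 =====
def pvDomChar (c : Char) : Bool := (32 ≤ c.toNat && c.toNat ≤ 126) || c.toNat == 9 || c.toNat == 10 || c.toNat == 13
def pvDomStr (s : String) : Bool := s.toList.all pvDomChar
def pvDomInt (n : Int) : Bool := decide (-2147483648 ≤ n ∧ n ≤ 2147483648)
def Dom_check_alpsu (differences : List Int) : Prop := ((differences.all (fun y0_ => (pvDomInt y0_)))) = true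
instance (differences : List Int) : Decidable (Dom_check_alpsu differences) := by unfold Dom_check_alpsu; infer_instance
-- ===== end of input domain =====

-- B replaces A's adjacent-index pair scan by a run-based pass (maximal same-sign runs, each checked constant); alternative decomposition, same cost.


-- ===== PORT A =====
-- A's index loop over range(len-1) comparing differences[i] with differences[i+1],
-- as the obvious structural recursion over adjacent pairs.
def pairLoop : List Int → Bool
  | a :: b :: rest =>
      if (a > 0 && b > 0) || (a < 0 && b < 0) then
        if a ≠ b then false else pairLoop (b :: rest)
      else pairLoop (b :: rest)
  | _ => true

def check_alpsu (differences : List Int) : Bool :=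
  if differences.any (fun d => d == 0) then false
  else
    match PySem.List.pyGet? differences 0, PySem.List.pyGet? differences (-1) with
    | some f, some l => if f < 0 || l > 0 then false else pairLoop differences
    | _, _ => false   -- unreachable under Pre_ (Python raises IndexError on [])

-- ===== PORT B =====
-- runs[-1].append(d) / runs.append([d]) of Source B, with the runs list kept most-recent-first
-- (head is Python's runs[-1]); the final `all` reverses it back to Python's order.
def addRun (runs : List (List Int)) (d : Int) : List (List Int) :=
  match runs with
  | (h :: t) :: rs =>
      if decide (h > 0) == decide (d > 0) then ((h :: t) ++ [d]) :: rs
      else [d] :: (h :: t) :: rs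
  | _ => [[d]]

-- all(x == run[0] for x in run)
def uniformRun (run : List Int) : Bool :=
  match run with
  | h :: t => (h :: t).all (fun x => x == h)
  | [] => true

def check_alpsu_alt (differences : List Int) : Bool :=
  if differences.any (fun d => d == 0) then false
  else
    match PySem.List.pyGet? differences 0 with
    | none => false   -- unreachable under Pre_ (Python raises IndexError on [])
    | some f =>
      match PySem.List.pyGet? differences (-1) with
      | none => false
      | some l =>
        if f < 0 || l > 0 then false
        else ((differences.foldl addRun []).reverse).all uniformRun

-- ===== PRECONDITION & SPEC =====
-- Pre_ excludes only the empty list, on which Python's first-element indexing raises IndexError.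
def Pre_check_alpsu (differences : List Int) : Prop := differences ≠ []
instance (differences : List Int) : Decidable (Pre_check_alpsu differences) := by
  unfold Pre_check_alpsu; infer_instance
def pvWitness_check_alpsu : List Int := [1, -2]

def Spec_check_alpsu (differences : List Int) (out : Bool) : Prop := out = check_alpsu_alt differences
instance (differences : List Int) (out : Bool) : Decidable (Spec_check_alpsu differences out) := by unfold Spec_check_alpsu; infer_instance

-- ===== CLAIM (what is proved, stated in full; the proofs are below) =====
def Claim_equal_check_alpsu : Prop := ∀ (differences : List Int), Dom_check_alpsu differences → Pre_check_alpsu differences → Spec_check_alpsu differences (check_alpsu differences)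

-- ===== LEMMAS AND PROOFS =====

-- The pairwise relation both programs decide on zero-free lists, as a boolean chain:
-- "same sign implies equal", for adjacent elements.
def Rb (a b : Int) : Bool := (decide (0 < a) != decide (0 < b)) || a == b

def chainB : List Int → Bool
  | a :: b :: rest => Rb a b && chainB (b :: rest)
  | _ => true

-- A's scan decides the chain on zero-free lists.
lemma pairLoop_eq_chain (l : List Int) (hz : ∀ x ∈ l, x ≠ 0) :
    pairLoop l = chainB l := by
  match l with
  | [] => simp [pairLoop, chainB]
  | [a] => simp [pairLoop, chainB]
  | a :: b :: rest =>
    have ha : a ≠ 0 := hz a (by simp)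
    have hb : b ≠ 0 := hz b (by simp)
    have ih := pairLoop_eq_chain (b :: rest) (fun x hx => hz x (by simp [hx]))
    rw [pairLoop, chainB]
    by_cases hsg : (0 < a) = (0 < b)
    · have hsg' : (0 < a) ↔ (0 < b) := Iff.of_eq hsg
      have hc : ((a > 0 && b > 0) || (a < 0 && b < 0)) = true := by
        simp only [gt_iff_lt, Bool.or_eq_true, Bool.and_eq_true, decide_eq_true_eq]
        omega
      rw [hc]
      by_cases hab : a = b
      · subst hab
        simp [ih, Rb]
      · have hR : Rb a b = false := by simp [Rb, hsg, hab]
        simp [hab, hR]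
    · have hsg' : ¬ ((0 < a) ↔ (0 < b)) := fun h => hsg (propext h)
      have hc : ((a > 0 && b > 0) || (a < 0 && b < 0)) = false := by
        simp only [gt_iff_lt, Bool.or_eq_false_iff, Bool.and_eq_false_iff,
          decide_eq_false_iff_not, not_lt]
        omega
      rw [hc]
      have hR : Rb a b = true := by
        have hd : (decide (0 < a) != decide (0 < b)) = true := by
          simp only [bne_iff_ne, ne_eq, decide_eq_decide]
          exact fun h => hsg (propext h)
        simp [Rb, hd]
      simp [ih, hR]

-- The run-building fold, with generalized accumulator: the top run (c :: cs) is
-- sign-homogeneous; result = finished runs uniform ∧ top run constant ∧ chain from c.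
lemma foldl_addRun_eq (rest : List Int) : ∀ (c : Int) (cs : List Int) (rs : List (List Int)),
    (∀ x ∈ cs, decide (0 < x) = decide (0 < c)) →
    ((List.foldl addRun ((c :: cs) :: rs) rest).reverse).all uniformRun
      = (rs.reverse.all uniformRun && (c :: cs).all (fun x => x == c) && chainB (c :: rest)) := by
  induction rest with
  | nil =>
    intro c cs rs _
    simp [uniformRun, chainB, List.all_append, Bool.and_comm]
  | cons d rest ih =>
    intro c cs rs hsg
    rw [List.foldl_cons]
    by_cases hs : decide (c > 0) = decide (d > 0)
    · have hstep : addRun ((c :: cs) :: rs) d = ((c :: cs) ++ [d]) :: rs := by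
        simp [addRun, hs]
      rw [hstep]
      have hsg' : ∀ x ∈ cs ++ [d], decide (0 < x) = decide (0 < c) := by
        intro x hx
        rcases List.mem_append.1 hx with h | h
        · exact hsg x h
        · simp at h; subst h
          simpa [gt_iff_lt] using hs.symm
      have hrec := ih c (cs ++ [d]) rs hsg'
      rw [List.cons_append, hrec]
      by_cases hcd : c = d
      · have hR : Rb c d = true := by simp [Rb, hcd]
        subst hcd
        rw [chainB]
        simp [List.all_append, hR]
      · have hR : Rb c d = false := by simp [Rb, hs, hcd]
        rw [chainB, hR]
        simp [List.all_append]
        exact fun _ _ h => absurd h.symm hcd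
    · have hstep : addRun ((c :: cs) :: rs) d = [d] :: (c :: cs) :: rs := by
        simp [addRun, hs]
      rw [hstep]
      have hrec := ih d [] ((c :: cs) :: rs) (by intro x hx; simp at hx)
      rw [hrec]
      have hR : Rb c d = true := by
        have hd : (decide (0 < c) != decide (0 < d)) = true := by
          simpa [bne_iff_ne] using hs
        simp [Rb, hd]
      rw [chainB, hR]
      simp only [List.reverse_cons, List.all_append, List.all_cons, List.all_nil,
        Bool.true_and, Bool.and_true, uniformRun]
      simp [Bool.and_comm, Bool.and_left_comm]

-- B's run check decides the chain on nonempty lists.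
lemma runsCheck_eq_chain (c : Int) (t : List Int) :
    ((List.foldl addRun [] (c :: t)).reverse).all uniformRun = chainB (c :: t) := by
  have h0 : List.foldl addRun [] (c :: t) = List.foldl addRun [[c]] t := by
    simp [addRun]
  rw [h0]
  have := foldl_addRun_eq t c [] [] (by intro x hx; simp at hx)
  simpa using this

-- ===== VERDICT (by name: the statement is the Claim_ definition above) =====
theorem check_alpsu_spec : Claim_equal_check_alpsu := by
  intro l _ hpre
  unfold Spec_check_alpsu check_alpsu check_alpsu_alt
  by_cases hz : l.any (fun d => d == 0)
  · simp [hz]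
  · simp only [hz, Bool.false_eq_true, if_false]
    match l, hpre with
    | c :: t, _ =>
      rcases hg1 : PySem.List.pyGet? (c :: t) (-1) with _ | last
      · simp [PySem.List.pyGet?, PySem.List.pyIdx?] at hg1
      · have hg0 : PySem.List.pyGet? (c :: t) 0 = some c := by
          simp [PySem.List.pyGet?, PySem.List.pyIdx?]
        simp only [hg0]
        by_cases hguard : (decide (c < 0) || decide (last > 0)) = true
        · rw [if_pos hguard, if_pos hguard]
        · rw [if_neg hguard, if_neg hguard]
          have hz' : ∀ x ∈ c :: t, x ≠ 0 := by
            intro x hx h0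
            exact hz (List.any_eq_true.2 ⟨x, hx, by simp [h0]⟩)
          rw [pairLoop_eq_chain _ hz', runsCheck_eq_chain]
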